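-- pv_equiv track=rewrite | github.com/jongheonleee/Backjun_Programmers | 프로그래머스/lv1/42840. 모의고사/모의고사.py | solution
-- ===== SOURCE A (Python) =====
-- def solution(answers):
--     answer = []
--     A, B, C = '12345', '21232425', '3311224455'
--     ansA, ansB, ansC = 0, 0, 0
--
--     for i, a in enumerate(answers):
--         Ai, Bi, Ci = i % 5, i % 8, i % 10
--
--         if A[Ai] == str(a):
--             ansA += 1
--
--         if B[Bi] == str(a):
--             ansB += 1
--
--         if C[Ci] == str(a):
--             ansC += 1
--
--     ansM = max([ansA, ansB, ansC])
--     for i, ans in enumerate([ansA, ansB, ansC]):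
--         if ans == ansM:
--             answer.append(i+1)
--
--     return answer
-- ===== SOURCE B (Python) =====
-- def solution(answers):
--     buckets = {}
--     for i, a in enumerate(answers):
--         k = (i % 40, str(a))
--         buckets[k] = buckets.get(k, 0) + 1
--     patterns = ('12345', '21232425', '3311224455')
--     scores = [sum(c for (r, ch), c in buckets.items() if p[r % len(p)] == ch)
--               for p in patterns]
--     best = max(scores)
--     return [i + 1 for i, s in enumerate(scores) if s == best]
-- ===== Notes on version B (the rewrite author's own statement) =====
-- stated objective: alternative
-- what changed: A scores by comparing each answer against all three patterns in one interleaved scan with three accumulators; B instead builds a histogram keyed by (index mod 40, str(answer)) -- 40 is the patterns' common period -- and computes each pattern's score from the histogram buckets, never rescanning the answers.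
import Mathlib
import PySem

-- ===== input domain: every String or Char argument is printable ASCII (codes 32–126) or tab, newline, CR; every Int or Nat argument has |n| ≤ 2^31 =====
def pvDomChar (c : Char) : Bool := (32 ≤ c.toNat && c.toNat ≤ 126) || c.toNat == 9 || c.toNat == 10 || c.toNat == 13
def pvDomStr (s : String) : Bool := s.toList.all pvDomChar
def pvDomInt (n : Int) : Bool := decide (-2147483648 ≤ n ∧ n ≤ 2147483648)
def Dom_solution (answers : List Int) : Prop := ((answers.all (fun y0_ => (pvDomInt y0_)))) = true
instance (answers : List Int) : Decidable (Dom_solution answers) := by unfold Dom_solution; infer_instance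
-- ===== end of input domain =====

-- B replaces A's interleaved three-accumulator scan by a histogram keyed by
-- (index mod 40, str(answer)) — 40 is the patterns' common period — and scores each
-- pattern from the histogram buckets instead of rescanning the answers (alternative).

-- ===== PORT A =====
-- A[Ai] == str(a): pattern[i] is a one-char string; exact comparison with str(a) as char-lists.
def pvHitA (p : String) (i : Int) (a : Int) : Bool :=
  (PySem.Str.pyGet? p i).elim false (fun c => [c] == PySem.Int.toChars a)

def solution (answers : List Int) : List Int :=
  let step := fun (s : Int × Int × Int) (ia : Int × Int) =>
    let Ai := PySem.Int.mod ia.1 5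
    let Bi := PySem.Int.mod ia.1 8
    let Ci := PySem.Int.mod ia.1 10
    let s := if pvHitA "12345" Ai ia.2 then (s.1 + 1, s.2.1, s.2.2) else s
    let s := if pvHitA "21232425" Bi ia.2 then (s.1, s.2.1 + 1, s.2.2) else s
    if pvHitA "3311224455" Ci ia.2 then (s.1, s.2.1, s.2.2 + 1) else s
  let r := (PySem.List.enumerate answers 0).foldl step ((0 : Int), (0 : Int), (0 : Int))
  -- max([...]) on a nonempty literal list: max? never returns none here, default unused
  let ansM := (PySem.List.max? [r.1, r.2.1, r.2.2] (fun x => x)).getD 0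
  (PySem.List.enumerate [r.1, r.2.1, r.2.2] 0).foldl
    (fun acc (iv : Int × Int) => if iv.2 == ansM then acc ++ [iv.1 + 1] else acc) []

-- ===== PORT B =====
-- p[r % len(p)] == ch where ch = str(a) held as a char-list.
def pvHit (p : String) (r : Int) (ch : List Char) : Bool :=
  (PySem.Str.pyGet? p (PySem.Int.mod r (PySem.Str.len p))).elim false (fun c => [c] == ch)

def solution_alt (answers : List Int) : List Int :=
  let buckets : PySem.Dict (Int × List Char) Int :=
    (PySem.List.enumerate answers 0).foldl
      (fun d ia =>
        let k := (PySem.Int.mod ia.1 40, PySem.Int.toChars ia.2)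
        d.insert k (d.getD k 0 + 1))
      PySem.Dict.empty
  let scores := (["12345", "21232425", "3311224455"] : List String).map (fun p =>
    ((buckets.items.filter (fun kc => pvHit p kc.1.1 kc.1.2)).map (fun kc => kc.2)).sum)
  let best := (PySem.List.max? scores (fun x => x)).getD 0
  ((PySem.List.enumerate scores 0).filter (fun iv => iv.2 == best)).map (fun iv => iv.1 + 1)

-- ===== PRECONDITION & SPEC =====
def Spec_solution (answers : List Int) (out : List Int) : Prop := out = solution_alt answers
instance (answers : List Int) (out : List Int) : Decidable (Spec_solution answers out) := by unfold Spec_solution; infer_instance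

-- ===== CLAIM (what is proved, stated in full; the proofs are below) =====
def Claim_equal_solution : Prop := ∀ (answers : List Int), Dom_solution answers → Spec_solution answers (solution answers)

-- ===== LEMMAS AND PROOFS =====

-- the key B buckets an (index, answer) pair under
def pvKey (ia : Int × Int) : Int × List Char :=
  (PySem.Int.mod ia.1 40, PySem.Int.toChars ia.2)

-- A's per-pattern score of l with indices from i, as a 0/1 sum over the enumerated pairs
def pvScore (p : String) (l : List Int) (i : Int) : Int :=
  ((PySem.List.enumerate l i).map
    (fun ia => if pvHit p ia.1 (PySem.Int.toChars ia.2) then (1 : Int) else 0)).sum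

-- a nodup list s covering l: summing l's multiplicities over s's p-elements counts l's p-elements
lemma pvSumFilterCount {α : Type} [BEq α] [LawfulBEq α] (p : α → Bool) (l s : List α)
    (hnd : s.Nodup) (hsub : ∀ x ∈ l, x ∈ s) :
    ((s.filter p).map (fun k => (l.count k : Int))).sum = (l.countP p : Int) := by
  induction l with
  | nil => simp
  | cons x t ih =>
    have hx : x ∈ s := hsub x (by simp)
    have ih' := ih (fun y hy => hsub y (by simp [hy]))
    have hsplit : ((s.filter p).map (fun k => ((x :: t).count k : Int))).sum
        = ((s.filter p).map (fun k => (t.count k : Int))).sum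
          + ((s.filter p).map (fun k => if x == k then (1 : Int) else 0)).sum := by
      rw [← PySem.List.sum_map_add_int]
      apply congrArg
      apply List.map_congr_left
      intro k _
      rw [List.count_cons]; push_cast; split <;> simp
    have hcnt : ((s.filter p).countP (fun k => x == k)) = (s.filter p).count x := by
      apply List.countP_congr
      intro k _
      by_cases h : x = k
      · simp [h]
      · simp [h, Ne.symm h]
    have hind : ((s.filter p).map (fun k => if x == k then (1 : Int) else 0)).sum
        = if p x then 1 else 0 := by
      rw [PySem.List.sum_map_ite_one_zero, hcnt]
      by_cases hpx : p x
      · rw [List.count_eq_one_of_mem (hnd.filter p) (List.mem_filter.mpr ⟨hx, hpx⟩)]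
        simp [hpx]
      · rw [List.count_eq_zero.mpr (fun hmem => hpx (List.mem_filter.mp hmem).2)]
        simp [hpx]
    rw [hsplit, ih', hind, List.countP_cons]
    by_cases hpx : p x <;> simp [hpx]

-- B's per-pattern score over the histogram of ks = countP over ks
lemma pvScoreEq (p : String) (ks : List (Int × List Char)) :
    (((PySem.Dict.counter ks).items.filter (fun kc => pvHit p kc.1.1 kc.1.2)).map
        (fun kc => kc.2)).sum
      = (ks.countP (fun k => pvHit p k.1 k.2) : Int) := by
  rw [PySem.Dict.items_counter]
  rw [List.filter_map, List.map_map]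
  exact pvSumFilterCount (fun k => pvHit p k.1 k.2) ks (PySem.Set.ofList ks)
    (PySem.Set.nodup_ofList ks) (fun x hx => (PySem.Set.mem_ofList ks x).mpr hx)

-- folding i%40 into the key is invisible to a pattern whose length divides 40
lemma pvHit_mod40 (p : String) (hL : 0 < PySem.Str.len p) (hdvd : PySem.Str.len p ∣ 40)
    (i : Int) (ch : List Char) : pvHit p (PySem.Int.mod i 40) ch = pvHit p i ch := by
  have hmm : PySem.Int.mod (PySem.Int.mod i 40) (PySem.Str.len p)
      = PySem.Int.mod i (PySem.Str.len p) := by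
    rw [PySem.Int.mod_eq_emod_of_pos (a := i) (show (0:Int) < 40 by norm_num),
      PySem.Int.mod_eq_emod_of_pos hL, PySem.Int.mod_eq_emod_of_pos hL,
      Int.emod_emod_of_dvd i hdvd]
  unfold pvHit
  rw [hmm]

-- B's histogram score of pattern p = A's 0/1-sum score
lemma pvScoreB (p : String) (hL : 0 < PySem.Str.len p) (hdvd : PySem.Str.len p ∣ 40)
    (answers : List Int) :
    (((PySem.Dict.counter ((PySem.List.enumerate answers 0).map pvKey)).items.filter
        (fun kc => pvHit p kc.1.1 kc.1.2)).map (fun kc => kc.2)).sum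
      = pvScore p answers 0 := by
  rw [pvScoreEq]
  unfold pvScore
  rw [PySem.List.sum_map_ite_one_zero, List.countP_map]
  congr 1
  apply List.countP_congr
  intro ia _
  simp only [Function.comp_apply, pvKey]
  rw [pvHit_mod40 p hL hdvd ia.1 (PySem.Int.toChars ia.2)]

lemma pvHit_eq5 (i a : Int) :
    pvHitA "12345" (PySem.Int.mod i 5) a = pvHit "12345" i (PySem.Int.toChars a) := by
  simp [pvHitA, pvHit]

lemma pvHit_eq8 (i a : Int) :
    pvHitA "21232425" (PySem.Int.mod i 8) a = pvHit "21232425" i (PySem.Int.toChars a) := by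
  simp [pvHitA, pvHit]

lemma pvHit_eq10 (i a : Int) :
    pvHitA "3311224455" (PySem.Int.mod i 10) a = pvHit "3311224455" i (PySem.Int.toChars a) := by
  simp [pvHitA, pvHit]

-- A's interleaved fold = the three per-pattern scores
lemma pvFoldA (l : List Int) (i x y z : Int) :
    (PySem.List.enumerate l i).foldl
      (fun (s : Int × Int × Int) (ia : Int × Int) =>
        let Ai := PySem.Int.mod ia.1 5
        let Bi := PySem.Int.mod ia.1 8
        let Ci := PySem.Int.mod ia.1 10
        let s := if pvHitA "12345" Ai ia.2 then (s.1 + 1, s.2.1, s.2.2) else s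
        let s := if pvHitA "21232425" Bi ia.2 then (s.1, s.2.1 + 1, s.2.2) else s
        if pvHitA "3311224455" Ci ia.2 then (s.1, s.2.1, s.2.2 + 1) else s)
      (x, y, z)
    = (x + pvScore "12345" l i, y + pvScore "21232425" l i, z + pvScore "3311224455" l i) := by
  induction l generalizing i x y z with
  | nil => simp [pvScore, PySem.List.enumerate_nil]
  | cons a t ih =>
    simp only [PySem.List.enumerate_cons, List.foldl_cons]
    rw [ih]
    simp only [pvScore, PySem.List.enumerate_cons, List.map_cons, List.sum_cons,
      pvHit_eq5, pvHit_eq8, pvHit_eq10]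
    split_ifs <;> simp <;> omega

-- ===== VERDICT (by name: the statement is the Claim_ definition above) =====
theorem solution_spec : Claim_equal_solution := by
  intro answers _
  show solution answers = solution_alt answers
  unfold solution solution_alt
  have hbuck :
      (PySem.List.enumerate answers 0).foldl
        (fun d ia =>
          let k := (PySem.Int.mod ia.1 40, PySem.Int.toChars ia.2)
          d.insert k (d.getD k 0 + 1))
        PySem.Dict.empty
      = PySem.Dict.counter ((PySem.List.enumerate answers 0).map pvKey) := by
    rw [← PySem.Dict.foldl_insert_getD_add_one_eq_counter, List.foldl_map]
    rfl
  simp only [List.map_cons, List.map_nil]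
  rw [hbuck, pvFoldA]
  simp only [zero_add]
  rw [pvScoreB "12345" (by decide) (by decide),
    pvScoreB "21232425" (by decide) (by decide),
    pvScoreB "3311224455" (by decide) (by decide)]
  exact PySem.List.foldl_append_if _ _ _ _
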